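-- pv_equiv track=rewrite | github.com/brussels-sprout/deferred_acceptance_algorithm | interface.py | check_preferences_content
-- ===== SOURCE A (Python) =====
-- def check_preferences_content(group_a, group_b):  # # checks if the preferences of each group only contain the names of the other group
--     for preferences in group_a.values():
--         for preference in preferences:
--             if preference not in group_b.keys():
--                 return False
--
--     for preferences in group_b.values():
--         for preference in preferences:
--             if preference not in group_a.keys():
--                 return False
--
--     return True
-- ===== SOURCE B (Python) =====
-- def check_preferences_content(group_a, group_b):
--     def subset_by_merge(group_from, group_to):
--         # sort the distinct referenced names and the target keys, then one merge scan
--         refs = sorted(set(p for prefs in group_from.values() for p in prefs))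
--         keys = sorted(group_to)
--         i = 0
--         for r in refs:
--             while i < len(keys) and keys[i] < r:
--                 i += 1
--             if i == len(keys) or keys[i] != r:
--                 return False
--         return True
--     return subset_by_merge(group_a, group_b) and subset_by_merge(group_b, group_a)
-- ===== Notes on version B (the rewrite author's own statement) =====
-- stated objective: alternative
-- what changed: Replaces per-element hash-membership loops by a sort-then-merge subset test: each group's distinct referenced names and the other group's keys are sorted, and a single two-pointer merge scan verifies the subset relation.
import Mathlib
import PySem

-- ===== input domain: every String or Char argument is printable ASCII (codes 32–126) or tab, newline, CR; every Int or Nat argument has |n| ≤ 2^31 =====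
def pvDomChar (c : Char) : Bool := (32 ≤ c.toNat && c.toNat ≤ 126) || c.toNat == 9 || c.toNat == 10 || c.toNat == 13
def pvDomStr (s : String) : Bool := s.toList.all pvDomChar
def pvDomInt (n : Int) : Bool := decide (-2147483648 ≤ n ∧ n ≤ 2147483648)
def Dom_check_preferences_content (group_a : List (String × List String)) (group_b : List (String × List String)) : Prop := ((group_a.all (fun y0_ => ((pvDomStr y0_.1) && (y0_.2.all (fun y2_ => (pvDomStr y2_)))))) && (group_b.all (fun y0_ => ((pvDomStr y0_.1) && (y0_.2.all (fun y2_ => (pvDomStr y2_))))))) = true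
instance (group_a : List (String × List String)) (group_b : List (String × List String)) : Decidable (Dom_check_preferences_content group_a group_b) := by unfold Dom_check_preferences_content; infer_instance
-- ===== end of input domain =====

-- B verifies the same subset conditions by a sort-then-merge two-pointer scan instead of per-element membership loops (alternative algorithm; same results).
-- ===== PORT A =====
-- inner 'for preference in preferences' loop with early 'return False'
def pvInnerLoop (preferences : List String) (keys : List String) : Bool :=
  match preferences with
  | [] => true
  | preference :: rest =>
      if !(keys.contains preference) then false
      else pvInnerLoop rest keys

-- outer 'for preferences in <group>.values()' loop with early 'return False'
def pvOuterLoop (vals : List (List String)) (keys : List String) : Bool :=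
  match vals with
  | [] => true
  | preferences :: rest =>
      match pvInnerLoop preferences keys with
      | false => false
      | true => pvOuterLoop rest keys

def check_preferences_content (group_a : List (String × List String)) (group_b : List (String × List String)) : Bool :=
  match pvOuterLoop (group_a.map Prod.snd) (group_b.map Prod.fst) with
  | false => false
  | true => pvOuterLoop (group_b.map Prod.snd) (group_a.map Prod.fst)

-- ===== PORT B =====
-- the 'while i < len(keys) and keys[i] < r: i += 1' loop: advance the pointer past keys below r
def pvSkip (r : String) : List String → List String
  | [] => []
  | k :: ks => if k < r then pvSkip r ks else k :: ks

-- the 'for r in refs' loop of subset_by_merge, carrying the advancing key pointer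
def pvMerge : List String → List String → Bool
  | [], _ => true
  | r :: rs, keys =>
      match pvSkip r keys with
      | [] => false
      | k :: t => if k ≠ r then false else pvMerge rs (k :: t)

def pvSubsetByMerge (group_from : List (String × List String)) (group_to : List (String × List String)) : Bool :=
  let refs := PySem.List.sorted (PySem.Set.ofList ((group_from.map Prod.snd).flatten)) (fun x => x) false
  let keys := PySem.List.sorted (group_to.map Prod.fst) (fun x => x) false
  pvMerge refs keys

def check_preferences_content_alt (group_a : List (String × List String)) (group_b : List (String × List String)) : Bool :=
  pvSubsetByMerge group_a group_b && pvSubsetByMerge group_b group_a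

-- ===== PRECONDITION & SPEC =====
def Spec_check_preferences_content (group_a : List (String × List String)) (group_b : List (String × List String)) (out : Bool) : Prop := out = check_preferences_content_alt group_a group_b
instance (group_a : List (String × List String)) (group_b : List (String × List String)) (out : Bool) : Decidable (Spec_check_preferences_content group_a group_b out) := by unfold Spec_check_preferences_content; infer_instance

-- ===== CLAIM (what is proved, stated in full; the proofs are below) =====
def Claim_equal_check_preferences_content : Prop := ∀ (group_a : List (String × List String)) (group_b : List (String × List String)), Dom_check_preferences_content group_a group_b → Spec_check_preferences_content group_a group_b (check_preferences_content group_a group_b)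

-- ===== LEMMAS AND PROOFS =====
lemma pvInner_eq_all (preferences keys : List String) :
    pvInnerLoop preferences keys = preferences.all keys.contains := by
  induction preferences with
  | nil => rfl
  | cons p rest ih => by_cases h : keys.contains p <;> simp [pvInnerLoop, ih]

lemma pvOuter_eq_all (vals : List (List String)) (keys : List String) :
    pvOuterLoop vals keys = vals.all (fun prefs => prefs.all keys.contains) := by
  induction vals with
  | nil => rfl
  | cons prefs rest ih =>
      simp only [pvOuterLoop, pvInner_eq_all, List.all_cons]
      cases h : prefs.all keys.contains <;> simp [ih]

lemma pvSkip_subset {r x : String} {keys : List String} (h : x ∈ pvSkip r keys) : x ∈ keys := by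
  induction keys with
  | nil => simp [pvSkip] at h
  | cons k ks ih =>
      simp only [pvSkip] at h
      split at h
      · exact List.mem_cons_of_mem _ (ih h)
      · exact h

lemma pvSkip_mem {r r' : String} (hrr : r ≤ r') (keys : List String) :
    r' ∈ pvSkip r keys ↔ r' ∈ keys := by
  induction keys with
  | nil => simp [pvSkip]
  | cons k ks ih =>
      simp only [pvSkip]
      split
      · rename_i hk
        have hne : r' ≠ k := by
          intro he; subst he; exact absurd (lt_of_lt_of_le hk hrr) (lt_irrefl _)
        simp [ih, hne]
      · simp

lemma pvSkip_pairwise {r : String} {keys : List String}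
    (h : keys.Pairwise (· ≤ ·)) : (pvSkip r keys).Pairwise (· ≤ ·) := by
  induction keys with
  | nil => exact h
  | cons k ks ih =>
      simp only [pvSkip]
      split
      · exact ih h.tail
      · exact h

lemma pvSkip_head_ge {r k : String} {keys t : List String}
    (h : pvSkip r keys = k :: t) : r ≤ k := by
  induction keys with
  | nil => simp [pvSkip] at h
  | cons k0 ks ih =>
      simp only [pvSkip] at h
      split at h
      · exact ih h
      · rename_i hk
        cases h
        exact le_of_not_gt hk

lemma all_congr_mem {p q : String → Bool} {l : List String}
    (h : ∀ x ∈ l, p x = q x) : l.all p = l.all q := by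
  induction l with
  | nil => rfl
  | cons a t ih =>
      simp only [List.all_cons, h a (List.mem_cons_self), ih (fun x hx => h x (List.mem_cons_of_mem _ hx))]

lemma pvMerge_correct (refs : List String) :
    ∀ keys : List String, refs.Pairwise (· ≤ ·) → keys.Pairwise (· ≤ ·) →
    pvMerge refs keys = refs.all keys.contains := by
  induction refs with
  | nil => intro keys _ _; rfl
  | cons r rs ih =>
      intro keys hr hk
      simp only [pvMerge, List.all_cons]
      cases hsk : pvSkip r keys with
      | nil =>
          have : r ∉ keys := by
            intro hm
            have := (pvSkip_mem (le_refl r) keys).mpr hm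
            simp [hsk] at this
          simp [this]
      | cons k t =>
          have hrk : r ≤ k := pvSkip_head_ge hsk
          by_cases hek : k = r
          · subst hek
            have hmem : k ∈ keys := pvSkip_subset (by rw [hsk]; exact List.mem_cons_self)
            have hkt : (k :: t).Pairwise (fun a b => a ≤ b) := hsk ▸ pvSkip_pairwise hk
            have ihr := ih (k :: t) hr.tail hkt
            have hc : keys.contains k = true := by simp [hmem]
            show (if k ≠ k then false else pvMerge rs (k :: t)) = (keys.contains k && rs.all keys.contains)
            rw [if_neg (by simp), ihr, hc, Bool.true_and]
            refine all_congr_mem (fun x hx => ?_)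
            have hkx : k ≤ x := List.rel_of_pairwise_cons hr hx
            have hmx : x ∈ (k :: t) ↔ x ∈ keys := by rw [← hsk]; exact pvSkip_mem hkx keys
            simp [hmx]
          · have hlt : r < k := lt_of_le_of_ne hrk (fun he => hek he.symm)
            have : r ∉ keys := by
              intro hm
              have hm' : r ∈ k :: t := by rw [← hsk]; exact (pvSkip_mem (le_refl r) keys).mpr hm
              rcases List.mem_cons.mp hm' with he | hm''
              · exact hek he.symm
              · have hkt : (k :: t).Pairwise (fun a b => a ≤ b) := hsk ▸ pvSkip_pairwise hk
                have := List.rel_of_pairwise_cons hkt hm''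
                exact absurd (lt_of_lt_of_le hlt this) (lt_irrefl _)
            simp [this, hek]

lemma all_flatten (l : List (List String)) (p : String → Bool) :
    l.flatten.all p = l.all (fun s => s.all p) := by
  induction l with
  | nil => rfl
  | cons a t ih => simp [List.flatten_cons, List.all_append, ih]

lemma pvSubsetByMerge_eq (gf gt : List (String × List String)) :
    pvSubsetByMerge gf gt = pvOuterLoop (gf.map Prod.snd) (gt.map Prod.fst) := by
  unfold pvSubsetByMerge
  rw [pvOuter_eq_all, ← all_flatten]
  set vals := (gf.map Prod.snd).flatten with hv
  set ks := gt.map Prod.fst with hks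
  have hrs : (PySem.List.sorted (PySem.Set.ofList vals) (fun x => x) false).Pairwise (· ≤ ·) :=
    PySem.List.sorted_pairwise _ _
  have hkss : (PySem.List.sorted ks (fun x => x) false).Pairwise (· ≤ ·) :=
    PySem.List.sorted_pairwise _ _
  rw [pvMerge_correct _ _ hrs hkss]
  rw [Bool.eq_iff_iff]
  simp [List.all_eq_true, PySem.List.mem_sorted, PySem.Set.mem_ofList]

-- ===== VERDICT (by name: the statement is the Claim_ definition above) =====
theorem check_preferences_content_spec : Claim_equal_check_preferences_content := by
  intro ga gb _
  unfold Spec_check_preferences_content check_preferences_content check_preferences_content_alt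
  rw [pvSubsetByMerge_eq, pvSubsetByMerge_eq]
  cases h : pvOuterLoop (ga.map Prod.snd) (gb.map Prod.fst) <;> simp
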